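-- pv_equiv track=rewrite | github.com/s-spillias/EcoGrouping | scripts/helper.py | get_model_shorthand
-- ===== SOURCE A (Python) =====
-- def get_model_shorthand(model_name):
--     """Flexible model shorthand mapping with three matching strategies:
--     1. Exact match
--     2. Substring match (key in model_name)
--     3. Reverse substring match (model_name in key)
--     """
--     shorthand_map = {
--         "claude-sonnet-4-20250514": "Claude-Sonnet-4",
--         "qwen3:30b": "Qwen3-30B",
--         "ollama_qwen3:235b-a22b-instruct-2507-q4_K_M": "Qwen3-235B",
--         "qwen3:235b": "Qwen3-235B",
--         "deepseek-r170b": "DeepSeek-R1-70B",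
--         "deepseek-r114b":"DeepSeek-R1-14B",
--         "ollama_deepseek-r1:70b": "DeepSeek-R1-70B",
--         "ollama_gpt-oss:latest": "GPT-oss-20B",
--         "gpt-osslatest": "GPT-oss-20B",
--         "gpt-oss": "GPT-oss-20B",
--         "gpt-oss120b": "GPT-oss-120B",
--         "ollama_gpt-oss:120b": "GPT-oss-120B",
--         "ollama_gemma3n:latest": "Gemma3n",
--         "gemma3n":"Gemma3n",
--         "ollama_deepseek-r1:14b": "DeepSeek-R1-14B",
--         "gemini-2.5-flash": "Gemini-Flash-2.5"
--     }
--
--     # 1. Exact match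
--     if model_name in shorthand_map:
--         return shorthand_map[model_name]
--
--     # 2. Substring match (key in model_name)
--     for key, shorthand in shorthand_map.items():
--         if key in model_name:
--             return shorthand
--
--     # 3. Reverse substring match (model_name in key)
--     for key, shorthand in shorthand_map.items():
--         if model_name in key:
--             return shorthand
--
--     # Fallback to original name
--     return model_name
-- ===== SOURCE B (Python) =====
-- def get_model_shorthand(model_name):
--     """Single pass over the map: rank each key by match tier (0 exact,
--     1 key-in-name, 2 name-in-key) and keep the first key of the lowest
--     tier seen; fall back to the original name."""
--     shorthand_map = {
--         "claude-sonnet-4-20250514": "Claude-Sonnet-4",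
--         "qwen3:30b": "Qwen3-30B",
--         "ollama_qwen3:235b-a22b-instruct-2507-q4_K_M": "Qwen3-235B",
--         "qwen3:235b": "Qwen3-235B",
--         "deepseek-r170b": "DeepSeek-R1-70B",
--         "deepseek-r114b":"DeepSeek-R1-14B",
--         "ollama_deepseek-r1:70b": "DeepSeek-R1-70B",
--         "ollama_gpt-oss:latest": "GPT-oss-20B",
--         "gpt-osslatest": "GPT-oss-20B",
--         "gpt-oss": "GPT-oss-20B",
--         "gpt-oss120b": "GPT-oss-120B",
--         "ollama_gpt-oss:120b": "GPT-oss-120B",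
--         "ollama_gemma3n:latest": "Gemma3n",
--         "gemma3n":"Gemma3n",
--         "ollama_deepseek-r1:14b": "DeepSeek-R1-14B",
--         "gemini-2.5-flash": "Gemini-Flash-2.5"
--     }
--     best = None  # (tier, shorthand)
--     for key, shorthand in shorthand_map.items():
--         if key == model_name:
--             tier = 0
--         elif key in model_name:
--             tier = 1
--         elif model_name in key:
--             tier = 2
--         else:
--             continue
--         if best is None or tier < best[0]:
--             best = (tier, shorthand)
--     return model_name if best is None else best[1]
-- ===== Notes on version B (the rewrite author's own statement) =====
-- stated objective: simpler
-- what changed: Replaces A's three sequential scans of the map (exact match, then key-in-name, then name-in-key) by a single pass that ranks each key with a match tier and keeps the first key of the lowest tier seen.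
import Mathlib
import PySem

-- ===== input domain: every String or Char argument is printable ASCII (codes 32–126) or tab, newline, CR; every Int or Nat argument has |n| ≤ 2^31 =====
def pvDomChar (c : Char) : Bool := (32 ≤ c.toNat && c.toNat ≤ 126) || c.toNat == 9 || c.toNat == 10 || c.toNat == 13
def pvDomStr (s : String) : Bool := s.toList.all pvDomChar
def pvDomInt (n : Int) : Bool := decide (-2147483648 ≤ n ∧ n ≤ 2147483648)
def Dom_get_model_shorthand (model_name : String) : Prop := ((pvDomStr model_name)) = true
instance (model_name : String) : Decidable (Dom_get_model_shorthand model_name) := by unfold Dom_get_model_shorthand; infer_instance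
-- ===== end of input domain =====

-- B replaces A's three sequential scans of the map by one pass that tracks the
-- best (lowest-tier) match; objective: simpler (one loop instead of three), same cost.

-- the shared constant map, as an association list in insertion order (keys distinct)
def pvShorthandMap : List (String × String) :=
  [("claude-sonnet-4-20250514", "Claude-Sonnet-4"),
   ("qwen3:30b", "Qwen3-30B"),
   ("ollama_qwen3:235b-a22b-instruct-2507-q4_K_M", "Qwen3-235B"),
   ("qwen3:235b", "Qwen3-235B"),
   ("deepseek-r170b", "DeepSeek-R1-70B"),
   ("deepseek-r114b", "DeepSeek-R1-14B"),
   ("ollama_deepseek-r1:70b", "DeepSeek-R1-70B"),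
   ("ollama_gpt-oss:latest", "GPT-oss-20B"),
   ("gpt-osslatest", "GPT-oss-20B"),
   ("gpt-oss", "GPT-oss-20B"),
   ("gpt-oss120b", "GPT-oss-120B"),
   ("ollama_gpt-oss:120b", "GPT-oss-120B"),
   ("ollama_gemma3n:latest", "Gemma3n"),
   ("gemma3n", "Gemma3n"),
   ("ollama_deepseek-r1:14b", "DeepSeek-R1-14B"),
   ("gemini-2.5-flash", "Gemini-Flash-2.5")]

-- ===== PORT A =====
-- 'model_name in shorthand_map' + 'shorthand_map[model_name]': first pair with equal key
def pvFind0 : List (String × String) → String → Option String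
  | [], _ => none
  | (k, v) :: rest, n => if k == n then some v else pvFind0 rest n

-- loop 2: first key with 'key in model_name'
def pvFind1 : List (String × String) → String → Option String
  | [], _ => none
  | (k, v) :: rest, n => if PySem.Str.isIn k n then some v else pvFind1 rest n

-- loop 3: first key with 'model_name in key'
def pvFind2 : List (String × String) → String → Option String
  | [], _ => none
  | (k, v) :: rest, n => if PySem.Str.isIn n k then some v else pvFind2 rest n

def get_model_shorthand (model_name : String) : String :=
  match pvFind0 pvShorthandMap model_name with
  | some v => v
  | none =>
    match pvFind1 pvShorthandMap model_name with
    | some v => v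
    | none =>
      match pvFind2 pvShorthandMap model_name with
      | some v => v
      | none => model_name

-- ===== PORT B =====
-- one loop step of Source B: rank the key, keep 'best' unless strictly better
def pvStep (n : String) (best : Option (Nat × String)) (kv : String × String) :
    Option (Nat × String) :=
  let tier? : Option Nat :=
    if kv.1 == n then some 0
    else if PySem.Str.isIn kv.1 n then some 1
    else if PySem.Str.isIn n kv.1 then some 2
    else none
  match tier? with
  | none => best
  | some t =>
    match best with
    | none => some (t, kv.2)
    | some (bt, bv) => if t < bt then some (t, kv.2) else some (bt, bv)

def get_model_shorthand_alt (model_name : String) : String :=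
  match pvShorthandMap.foldl (pvStep model_name) none with
  | none => model_name
  | some b => b.2

-- ===== PRECONDITION & SPEC =====
def Spec_get_model_shorthand (model_name : String) (out : String) : Prop := out = get_model_shorthand_alt model_name
instance (model_name : String) (out : String) : Decidable (Spec_get_model_shorthand model_name out) := by unfold Spec_get_model_shorthand; infer_instance

-- ===== CLAIM (what is proved, stated in full; the proofs are below) =====
def Claim_equal_get_model_shorthand : Prop := ∀ (model_name : String), Dom_get_model_shorthand model_name → Spec_get_model_shorthand model_name (get_model_shorthand model_name)

-- ===== LEMMAS AND PROOFS =====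

-- merge of two candidate matches: lower tier wins, the left (earlier) wins ties
def pvMerge : Option (Nat × String) → Option (Nat × String) → Option (Nat × String)
  | none, b => b
  | some a, none => some a
  | some (t₁, v₁), some (t₂, v₂) =>
    if t₁ ≤ t₂ then some (t₁, v₁) else some (t₂, v₂)

-- the best (lowest-tier, earliest) match in a list
def pvBestOf (n : String) : List (String × String) → Option (Nat × String)
  | [] => none
  | (k, v) :: rest =>
    pvMerge
      (if k == n then some (0, v)
       else if PySem.Str.isIn k n then some (1, v)
       else if PySem.Str.isIn n k then some (2, v)
       else none)
      (pvBestOf n rest)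

theorem pvStep_eq_merge (n : String) (b : Option (Nat × String)) (kv : String × String) :
    pvStep n b kv =
      pvMerge b
        (if kv.1 == n then some (0, kv.2)
         else if PySem.Str.isIn kv.1 n then some (1, kv.2)
         else if PySem.Str.isIn n kv.1 then some (2, kv.2)
         else none) := by
  rcases b with _ | ⟨bt, bw⟩
  · simp only [pvStep, pvMerge]
    split_ifs <;> rfl
  · simp only [pvStep]
    split_ifs
    · show (if (0:Nat) < bt then some ((0:Nat), kv.2) else some (bt, bw)) =
        (if bt ≤ 0 then some (bt, bw) else some ((0:Nat), kv.2))
      split_ifs <;> first | rfl | omega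
    · show (if (1:Nat) < bt then some ((1:Nat), kv.2) else some (bt, bw)) =
        (if bt ≤ 1 then some (bt, bw) else some ((1:Nat), kv.2))
      split_ifs <;> first | rfl | omega
    · show (if (2:Nat) < bt then some ((2:Nat), kv.2) else some (bt, bw)) =
        (if bt ≤ 2 then some (bt, bw) else some ((2:Nat), kv.2))
      split_ifs <;> first | rfl | omega
    · rfl

theorem pvMerge_assoc (a b c : Option (Nat × String)) :
    pvMerge (pvMerge a b) c = pvMerge a (pvMerge b c) := by
  rcases a with _ | ⟨ta, va⟩
  · rfl
  rcases b with _ | ⟨tb, vb⟩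
  · rfl
  rcases c with _ | ⟨tc, vc⟩
  · simp only [pvMerge]; split_ifs <;> rfl
  simp only [pvMerge]
  split_ifs <;>
    first
      | rfl
      | omega
      | (simp only [pvMerge]; split_ifs <;> first | rfl | omega)

theorem pvFoldl_eq_bestOf (n : String) (l : List (String × String))
    (b : Option (Nat × String)) :
    l.foldl (pvStep n) b = pvMerge b (pvBestOf n l) := by
  induction l generalizing b with
  | nil => cases b <;> rfl
  | cons kv rest ih =>
    rcases kv with ⟨k, v⟩
    rw [List.foldl_cons, ih, pvStep_eq_merge, pvMerge_assoc]
    rfl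

-- the single pass computes exactly A's three-phase cascade
theorem pvBestOf_cascade (n : String) (l : List (String × String)) :
    pvBestOf n l =
      match pvFind0 l n with
      | some v => some (0, v)
      | none =>
        match pvFind1 l n with
        | some v => some (1, v)
        | none => (pvFind2 l n).map (fun v => (2, v)) := by
  induction l with
  | nil => rfl
  | cons kv rest ih =>
    rcases kv with ⟨k, v⟩
    by_cases h0 : (k == n) = true
    · simp only [pvBestOf, pvFind0, h0, if_pos]
      rcases pvBestOf n rest with _ | b <;> simp [pvMerge]
    · by_cases h1 : PySem.Str.isIn k n = true
      · have h0' : (k == n) = false := by simpa using h0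
        simp only [pvBestOf, pvFind0, pvFind1, h0', h1, Bool.false_eq_true, if_false, if_pos, ih]
        rcases hf0 : pvFind0 rest n with _ | w
        · rcases hf1 : pvFind1 rest n with _ | u
          · rcases hf2 : pvFind2 rest n with _ | u <;> simp [pvMerge]
          · simp [pvMerge]
        · simp [pvMerge]
      · have h0' : (k == n) = false := by simpa using h0
        have h1' : PySem.Str.isIn k n = false := by simpa using h1
        by_cases h2 : PySem.Str.isIn n k = true
        · simp only [pvBestOf, pvFind0, pvFind1, pvFind2, h0', h1', h2, Bool.false_eq_true,
            if_false, if_pos, ih]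
          rcases hf0 : pvFind0 rest n with _ | w
          · rcases hf1 : pvFind1 rest n with _ | u
            · rcases hf2 : pvFind2 rest n with _ | u <;> simp [pvMerge]
            · simp [pvMerge]
          · simp [pvMerge]
        · have h2' : PySem.Str.isIn n k = false := by simpa using h2
          simp only [pvBestOf, pvFind0, pvFind1, pvFind2, h0', h1', h2', Bool.false_eq_true,
            if_false, ih]
          rcases pvBestOf n rest with _ | b <;> simp [pvMerge]

-- ===== VERDICT (by name: the statement is the Claim_ definition above) =====
theorem get_model_shorthand_spec : Claim_equal_get_model_shorthand := by
  intro n _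
  unfold Spec_get_model_shorthand get_model_shorthand get_model_shorthand_alt
  rw [pvFoldl_eq_bestOf, pvBestOf_cascade]
  rcases pvFind0 pvShorthandMap n with _ | v
  · rcases pvFind1 pvShorthandMap n with _ | v
    · rcases pvFind2 pvShorthandMap n with _ | v <;> rfl
    · rfl
  · rfl
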